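-- pv_equiv track=rewrite | github.com/cmeyers3/CPEGasus | ashley_version.py | pad_numbers
-- ===== SOURCE A (Python) =====
-- def pad_numbers(text):
--     '''
--     Pad text by adding an indicator character (`) before any numbers
--     '''
--     newWord = ''
--     prevChar = ''
--
--     # check if there is a number in the word and need to add padding character
--     for char in text:
--         # change the group to add the padding char (`)
--         if char.isdigit() and prevChar != '`': #if number and not already padded
--             newWord += '`'
--             newWord += char
--         else:
--             newWord += char
--         prevChar = char
--     return newWord
-- ===== SOURCE B (Python) =====
-- def pad_numbers(text):
--     '''
--     Pad text by adding an indicator character (`) before any numbers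
--     '''
--     # pass 1: indices that need a backtick inserted before them
--     pads = {i for i, ch in enumerate(text)
--             if ch.isdigit() and (i == 0 or text[i - 1] != '`')}
--     # pass 2: rebuild the string, inserting at the marked indices
--     out = []
--     for i, ch in enumerate(text):
--         if i in pads:
--             out.append('`')
--         out.append(ch)
--     return ''.join(out)
-- ===== Notes on version B (the rewrite author's own statement) =====
-- stated objective: alternative
-- what changed: Replaces the single scan carrying a prev-char accumulator with two passes: first compute the set of indices needing a backtick by indexed lookup into the original text, then rebuild the string from that index set.
import Mathlib
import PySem

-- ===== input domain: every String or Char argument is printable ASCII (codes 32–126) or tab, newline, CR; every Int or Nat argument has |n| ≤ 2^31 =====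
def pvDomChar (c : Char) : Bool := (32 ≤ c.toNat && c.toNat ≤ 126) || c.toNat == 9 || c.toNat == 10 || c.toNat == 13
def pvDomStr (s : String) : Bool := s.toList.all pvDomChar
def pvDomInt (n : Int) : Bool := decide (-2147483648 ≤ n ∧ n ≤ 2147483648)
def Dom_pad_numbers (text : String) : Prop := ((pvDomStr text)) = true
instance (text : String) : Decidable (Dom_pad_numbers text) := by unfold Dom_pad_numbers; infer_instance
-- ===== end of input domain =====

-- B rebuilds the string from a precomputed set of insertion indices instead of A's
-- single scan with a previous-character accumulator (objective: alternative).

-- ===== PORT A =====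
-- one pass; state = (newWord, prevChar), both as List Char (prevChar "" = [])
def pad_numbers (text : String) : String :=
  String.ofList
    (text.toList.foldl
      (fun (acc : List Char × List Char) c =>
        if PySem.Chars.isdigit c && acc.2 != ['`'] then
          (acc.1 ++ ['`'] ++ [c], [c])
        else
          (acc.1 ++ [c], [c]))
      ([], [])).1

-- ===== PORT B =====
-- pass 1: the set of indices needing a backtick (text[i-1] via pyGet?)
def pvPads (cs : List Char) : PySem.Set Int :=
  PySem.Set.ofList
    (((PySem.List.enumerate cs).filter
        (fun p => PySem.Chars.isdigit p.2 &&
          (p.1 == 0 || !(PySem.List.pyGet? cs (p.1 - 1) == some '`')))).map Prod.fst)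

def pad_numbers_alt (text : String) : String :=
  String.ofList ((PySem.List.enumerate text.toList).foldl
    (fun (out : List Char) p =>
      (if PySem.Set.contains (pvPads text.toList) p.1 then out ++ ['`'] else out) ++ [p.2]) [])

-- ===== PRECONDITION & SPEC =====
def Spec_pad_numbers (text : String) (out : String) : Prop := out = pad_numbers_alt text
instance (text : String) (out : String) : Decidable (Spec_pad_numbers text out) := by unfold Spec_pad_numbers; infer_instance

-- ===== CLAIM (what is proved, stated in full; the proofs are below) =====
def Claim_equal_pad_numbers : Prop := ∀ (text : String), Dom_pad_numbers text → Spec_pad_numbers text (pad_numbers text)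

-- ===== LEMMAS AND PROOFS =====

-- common reference recursion: pad with the previous character threaded through
def padRec (prev : List Char) : List Char → List Char
  | [] => []
  | c :: cs =>
    (if PySem.Chars.isdigit c && prev != ['`'] then ['`', c] else [c]) ++ padRec [c] cs

-- the previous character seen by A when it reaches position k
def prevAt (cs : List Char) (k : Nat) : List Char :=
  if k = 0 then [] else [cs.getD (k - 1) ' ']

theorem padA_eq (cs : List Char) :
    ∀ (acc prev : List Char),
      (cs.foldl
        (fun (st : List Char × List Char) c =>
          if PySem.Chars.isdigit c && st.2 != ['`'] then
            (st.1 ++ ['`'] ++ [c], [c])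
          else
            (st.1 ++ [c], [c]))
        (acc, prev)).1 = acc ++ padRec prev cs := by
  induction cs with
  | nil => intro acc prev; simp [padRec]
  | cons c cs ih =>
    intro acc prev
    simp only [List.foldl_cons, padRec]
    by_cases h : (PySem.Chars.isdigit c && prev != ['`']) = true
    · rw [if_pos h, ih]; simp [h]
    · rw [if_neg h, ih]
      simp only [Bool.not_eq_true] at h
      simp [h]

-- membership in the pad set, characterized by the index
theorem pads_mem (cs : List Char) (k : Nat) (hk : k < cs.length) :
    PySem.Set.contains (pvPads cs) (k : Int) =
      (PySem.Chars.isdigit cs[k] &&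
        ((k : Int) == 0 || !(PySem.List.pyGet? cs ((k : Int) - 1) == some '`'))) := by
  have hmem : ((k : Int) ∈ pvPads cs) ↔
      (PySem.Chars.isdigit cs[k] &&
        ((k : Int) == 0 || !(PySem.List.pyGet? cs ((k : Int) - 1) == some '`'))) = true := by
    unfold pvPads
    rw [PySem.Set.mem_ofList]
    simp only [List.mem_map, List.mem_filter, PySem.List.mem_enumerate_iff]
    constructor
    · rintro ⟨p, ⟨⟨j, hj, rfl⟩, hcond⟩, hfst⟩
      simp only [zero_add] at hcond hfst
      have : j = k := by exact_mod_cast hfst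
      subst this
      exact hcond
    · intro hcond
      exact ⟨((k : Int), cs[k]), ⟨⟨k, hk, by simp⟩, by simpa using hcond⟩, rfl⟩
  rcases h : (PySem.Chars.isdigit cs[k] &&
        ((k : Int) == 0 || !(PySem.List.pyGet? cs ((k : Int) - 1) == some '`'))) with _ | _
  · simp only [PySem.Set.contains, List.contains_eq_mem, decide_eq_false_iff_not]
    rw [h] at hmem
    simp [hmem]
  · simp only [PySem.Set.contains, List.contains_eq_mem, decide_eq_true_eq]
    rw [h] at hmem
    simp [hmem]

-- the pad-set test at index k agrees with A's prev-char test
theorem cond_eq_prev (cs : List Char) (k : Nat) (hk : k < cs.length) :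
    PySem.Set.contains (pvPads cs) (k : Int) =
      (PySem.Chars.isdigit cs[k] && prevAt cs k != ['`']) := by
  rw [pads_mem cs k hk]
  rcases Nat.eq_zero_or_pos k with h0 | hpos
  · subst h0; simp [prevAt]
  · have hk1 : k - 1 < cs.length := by omega
    have hEq : ((k : Int) - 1) = ((k - 1 : Nat) : Int) := by omega
    have hget : PySem.List.pyGet? cs ((k : Int) - 1) = some cs[k - 1] := by
      rw [hEq, PySem.List.pyGet?_natCast]
      exact List.getElem?_eq_getElem hk1
    have hne0 : ((k : Int) == 0) = false := by
      simp only [beq_eq_false_iff_ne, ne_eq]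
      omega
    rw [hget, hne0]
    have hprev : prevAt cs k = [cs[k - 1]] := by
      simp [prevAt, Nat.pos_iff_ne_zero.mp hpos, List.getElem?_eq_getElem hk1]
    rw [hprev]
    congr 1
    rcases hc : (cs[k - 1] == '`') with _ | _ <;> simp [bne, hc]

-- the B-side fold on the suffix starting at k equals padRec with prevAt
theorem padB_suffix (cs : List Char) :
    ∀ (t : List Char) (k : Nat) (acc : List Char), t = cs.drop k →
      ((PySem.List.enumerate t (k : Int)).foldl
        (fun (out : List Char) p =>
          (if PySem.Set.contains (pvPads cs) p.1 then out ++ ['`'] else out) ++ [p.2]) acc)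
        = acc ++ padRec (prevAt cs k) t := by
  intro t
  induction t with
  | nil => intro k acc _; simp [padRec]
  | cons c t ih =>
    intro k acc ht
    have hk : k < cs.length := by
      by_contra h
      push Not at h
      rw [List.drop_eq_nil_of_le h] at ht
      simp at ht
    have hck : cs[k] = c := by
      have h0 : (cs.drop k)[0]? = some c := by rw [← ht]; rfl
      rw [List.getElem?_drop] at h0
      simpa [List.getElem?_eq_getElem hk] using h0
    have ht' : t = cs.drop (k + 1) := by
      have := congrArg List.tail ht
      simpa [List.tail_drop] using this
    rw [PySem.List.enumerate_cons]
    simp only [List.foldl_cons]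
    have hcast : (k : Int) + 1 = ((k + 1 : Nat) : Int) := by omega
    rw [hcast, ih (k + 1) _ ht']
    have hprev' : prevAt cs (k + 1) = [c] := by
      simp [prevAt, List.getElem?_eq_getElem hk, hck]
    rw [hprev', cond_eq_prev cs k hk, hck]
    simp only [padRec]
    by_cases h : (PySem.Chars.isdigit c && prevAt cs k != ['`']) = true
    · simp [h]
    · simp only [Bool.not_eq_true] at h
      simp [h]

theorem pad_numbers_spec : Claim_equal_pad_numbers := by
  intro text _
  unfold Spec_pad_numbers pad_numbers pad_numbers_alt
  rw [padA_eq]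
  have hB := padB_suffix text.toList text.toList 0 [] (by simp)
  simp only [Nat.cast_zero] at hB
  rw [hB]
  simp [prevAt]
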